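-- pv_equiv track=rewrite | github.com/kevinpz/google-foobar | level2/lovely_lucky_lambs.py | stingyCase
-- ===== SOURCE A (Python) =====
-- def stingyCase(total_lambs):
-- 	remaining = total_lambs
-- 	last = 0
-- 	current = 1
-- 	number = 0
-- 	while (remaining >= current):
-- 		remaining -= current
-- 		number += 1
-- 		#new henchman have the sum of the 2 previous one
-- 		last, current = current, last + current
-- 	return number
-- ===== SOURCE B (Python) =====
-- def stingyCase(total_lambs):
--     # Build the table of cumulative Fibonacci costs [1, 2, 4, 7, 12, ...],
--     # one term past total_lambs, then binary-search for the answer.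
--     sums = []
--     s, a, b = 0, 0, 1
--     while True:
--         s += b
--         sums.append(s)
--         if s > total_lambs:
--             break
--         a, b = b, a + b
--     # bisect_right(sums, total_lambs) written out (A imports nothing)
--     lo, hi = 0, len(sums)
--     while lo < hi:
--         mid = (lo + hi) // 2
--         if total_lambs < sums[mid]:
--             hi = mid
--         else:
--             lo = mid + 1
--     return lo
-- ===== Notes on version B (the rewrite author's own statement) =====
-- stated objective: alternative
-- what changed: Replaces the decrement-and-count loop over a running remainder with a prebuilt table of cumulative Fibonacci costs followed by a hand-written binary search (bisect_right) for the number of affordable henchmen.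
import Mathlib
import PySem

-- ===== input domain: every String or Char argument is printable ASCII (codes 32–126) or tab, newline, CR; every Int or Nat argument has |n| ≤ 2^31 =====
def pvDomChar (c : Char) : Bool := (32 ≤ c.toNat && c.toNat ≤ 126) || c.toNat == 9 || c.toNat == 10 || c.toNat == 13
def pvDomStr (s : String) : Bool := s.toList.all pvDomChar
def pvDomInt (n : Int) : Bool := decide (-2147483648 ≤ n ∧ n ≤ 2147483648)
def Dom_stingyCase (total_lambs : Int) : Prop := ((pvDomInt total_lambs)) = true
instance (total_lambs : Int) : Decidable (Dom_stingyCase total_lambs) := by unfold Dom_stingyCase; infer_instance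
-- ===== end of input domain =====

-- B does the same exact counting by a different decomposition: a cumulative-Fibonacci table plus a binary search.

-- ===== PORT A =====
-- A's while loop; fuel is a totality guard only (each iteration subtracts current ≥ 1
-- from remaining while remaining ≥ current, so total_lambs.toNat + 1 steps always suffice).
def stingyLoop (fuel : Nat) (remaining last current number : Int) : Int :=
  match fuel with
  | 0 => number
  | fuel + 1 =>
    if current ≤ remaining then
      stingyLoop fuel (remaining - current) current (last + current) (number + 1)
    else
      number

def stingyCase (total_lambs : Int) : Int :=
  stingyLoop (total_lambs.toNat + 1) total_lambs 0 1 0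

-- ===== PORT B =====
-- the table-building loop of Source B (append s+b until it exceeds total_lambs); fuel is a
-- totality guard only (each appended sum grows by b ≥ 1, so total_lambs.toNat + 1 suffices)
def sumsTail (n : Int) (fuel : Nat) (s a b : Int) : List Int :=
  match fuel with
  | 0 => []
  | fuel + 1 =>
    let s' := s + b
    if n < s' then [s'] else s' :: sumsTail n fuel s' b (a + b)

-- Source B's hand-written bisect_right loop; fuel = length is a totality guard only (hi - lo shrinks)
def bisectGo (x : Int) (xs : List Int) (fuel : Nat) (lo hi : Nat) : Nat :=
  match fuel with
  | 0 => lo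
  | fuel + 1 =>
    if lo < hi then
      let mid := (lo + hi) / 2
      if x < xs.getD mid 0 then bisectGo x xs fuel lo mid
      else bisectGo x xs fuel (mid + 1) hi
    else lo

def stingyCase_alt (total_lambs : Int) : Int :=
  let sums := sumsTail total_lambs (total_lambs.toNat + 1) 0 0 1
  (bisectGo total_lambs sums sums.length 0 sums.length : Int)

-- ===== PRECONDITION & SPEC =====
def Spec_stingyCase (total_lambs : Int) (out : Int) : Prop := out = stingyCase_alt total_lambs
instance (total_lambs : Int) (out : Int) : Decidable (Spec_stingyCase total_lambs out) := by unfold Spec_stingyCase; infer_instance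

-- ===== CLAIM (what is proved, stated in full; the proofs are below) =====
def Claim_equal_stingyCase : Prop := ∀ (total_lambs : Int), Dom_stingyCase total_lambs → Spec_stingyCase total_lambs (stingyCase total_lambs)

-- ===== LEMMAS AND PROOFS =====

-- A's loop counts exactly the cumulative sums ≤ n produced by B's table builder.
theorem stingyLoop_eq_countP (n : Int) :
    ∀ (fuel : Nat) (s a b k : Int),
      stingyLoop fuel (n - s) a b k
        = k + ((sumsTail n fuel s a b).countP (fun v => v ≤ n) : Int) := by
  intro fuel
  induction fuel with
  | zero => intro s a b k; simp [stingyLoop, sumsTail]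
  | succ f ih =>
    intro s a b k
    by_cases h : n < s + b
    · have hb : ¬ b ≤ n - s := by omega
      simp [stingyLoop, sumsTail, h, hb]
    · have hb : b ≤ n - s := by omega
      have : n - s - b = n - (s + b) := by ring
      simp [stingyLoop, sumsTail, h, hb, this, ih (s + b) b (a + b) (k + 1),
        show ((s + b ≤ n) = True) by simp; omega]
      ring

-- the table is sorted (each element exceeds s, and the list is pairwise ≤)
theorem sumsTail_sorted (n : Int) :
    ∀ (fuel : Nat) (s a b : Int), 0 ≤ a → 1 ≤ b →
      (∀ x ∈ sumsTail n fuel s a b, s < x) ∧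
        (sumsTail n fuel s a b).Pairwise (fun u v => u ≤ v) := by
  intro fuel
  induction fuel with
  | zero => intro s a b _ _; simp [sumsTail]
  | succ f ih =>
    intro s a b ha hb
    by_cases h : n < s + b
    · simp [sumsTail, h]; omega
    · obtain ⟨htail, hpair⟩ := ih (s + b) b (a + b) (by omega) (by omega)
      refine ⟨?_, ?_⟩
      · intro x hx
        simp only [sumsTail, if_neg h, List.mem_cons] at hx
        rcases hx with rfl | hx
        · omega
        · have := htail x hx; omega
      · simp only [sumsTail, if_neg h]
        exact List.pairwise_cons.mpr ⟨fun x hx => le_of_lt (htail x hx), hpair⟩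

-- characterisation of countP on a sorted list: indices below the count satisfy ≤ x …
theorem sorted_getD_le (x : Int) :
    ∀ (xs : List Int), xs.Pairwise (fun u v => u ≤ v) →
      ∀ i, i < xs.countP (fun v => v ≤ x) → xs.getD i 0 ≤ x := by
  intro xs
  induction xs with
  | nil => intro _ i hi; simp at hi
  | cons h t ih =>
    intro hp i hi
    obtain ⟨hhead, hpt⟩ := List.pairwise_cons.mp hp
    by_cases hb : h ≤ x
    · cases i with
      | zero => simpa using hb
      | succ j =>
        simp only [List.countP_cons, hb, decide_true, if_pos] at hi
        have : j < t.countP (fun v => v ≤ x) := by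
          simp at hi ⊢; omega
        simpa using ih hpt j this
    · have hz : t.countP (fun v => v ≤ x) = 0 := by
        rw [List.countP_eq_zero]
        intro a ha
        simp only [decide_eq_true_eq]
        have := hhead a ha; omega
      simp [hb, hz] at hi
-- … and indices at or above it (within range) satisfy > x
theorem sorted_getD_gt (x : Int) :
    ∀ (xs : List Int), xs.Pairwise (fun u v => u ≤ v) →
      ∀ i, xs.countP (fun v => v ≤ x) ≤ i → i < xs.length → x < xs.getD i 0 := by
  intro xs
  induction xs with
  | nil => intro _ i _ hl; simp at hl
  | cons h t ih =>
    intro hp i hi hl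
    obtain ⟨hhead, hpt⟩ := List.pairwise_cons.mp hp
    by_cases hb : h ≤ x
    · cases i with
      | zero =>
        simp [hb] at hi
      | succ j =>
        simp only [List.countP_cons, hb, decide_true, if_pos] at hi
        have h1 : t.countP (fun v => v ≤ x) ≤ j := by simp at hi; omega
        have h2 : j < t.length := by simpa using hl
        simpa using ih hpt j h1 h2
    · push Not at hb
      cases i with
      | zero => simpa using hb
      | succ j =>
        have h2 : j < t.length := by simpa using hl
        have hmem : t.getD j 0 ∈ t := by
          rw [List.getD_eq_getElem?_getD, List.getElem?_eq_getElem h2]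
          simp
        have := hhead _ hmem
        simp only [List.getD_cons_succ]
        omega

-- the binary search returns countP on a sorted list
theorem bisectGo_eq_countP (x : Int) (xs : List Int)
    (hp : xs.Pairwise (fun u v => u ≤ v)) :
    ∀ (fuel lo hi : Nat),
      lo ≤ xs.countP (fun v => v ≤ x) → xs.countP (fun v => v ≤ x) ≤ hi →
      hi ≤ xs.length → hi - lo ≤ fuel →
      bisectGo x xs fuel lo hi = xs.countP (fun v => v ≤ x) := by
  intro fuel
  induction fuel with
  | zero =>
    intro lo hi h1 h2 h3 h4
    simp only [bisectGo]
    omega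
  | succ f ih =>
    intro lo hi h1 h2 h3 h4
    by_cases hlt : lo < hi
    · simp only [bisectGo, if_pos hlt]
      set mid := (lo + hi) / 2 with hmid
      have hm1 : lo ≤ mid := by omega
      have hm2 : mid < hi := by omega
      by_cases hc : x < xs.getD mid 0
      · have hcle : xs.countP (fun v => v ≤ x) ≤ mid := by
          by_contra hcon
          push Not at hcon
          exact absurd (sorted_getD_le x xs hp mid hcon) (by omega)
        simp only [if_pos hc]
        exact ih lo mid h1 hcle (by omega) (by omega)
      · have hcgt : mid < xs.countP (fun v => v ≤ x) := by
          by_contra hcon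
          push Not at hcon
          exact absurd (sorted_getD_gt x xs hp mid hcon (by omega)) (by omega)
        simp only [if_neg hc]
        exact ih (mid + 1) hi (by omega) h2 h3 (by omega)
    · simp only [bisectGo, if_neg hlt]
      omega

-- ===== VERDICT (by name: the statement is the Claim_ definition above) =====
theorem stingyCase_spec : Claim_equal_stingyCase := by
  intro n _
  unfold Spec_stingyCase stingyCase stingyCase_alt
  have hA := stingyLoop_eq_countP n (n.toNat + 1) 0 0 1 0
  simp only [sub_zero, zero_add] at hA
  rw [hA]
  set sums := sumsTail n (n.toNat + 1) 0 0 1 with hs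
  have hp : sums.Pairwise (fun u v => u ≤ v) :=
    (sumsTail_sorted n (n.toNat + 1) 0 0 1 (by omega) (by omega)).2
  have hc : sums.countP (fun v => v ≤ n) ≤ sums.length := List.countP_le_length
  have := bisectGo_eq_countP n sums hp sums.length 0 sums.length (by omega) hc (le_refl _) (by omega)
  show ((sums.countP (fun v => v ≤ n) : Int)) = ((bisectGo n sums sums.length 0 sums.length : Nat) : Int)
  exact_mod_cast this.symm
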